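-- pv_equiv track=rewrite | github.com/husjuly717-rgb/network | app.py | get_nrz_i
-- ===== SOURCE A (Python) =====
-- def get_nrz_i(data):
--     x, y = [0], [1] # Start at a positive level
--     current_level = 1
--     for i, bit in enumerate(data):
--         if bit == '1':
--             current_level *= -1 # Invert on 1
--         x.extend([i, i + 1])
--         y.extend([current_level, current_level])
--     return x, y
-- ===== SOURCE B (Python) =====
-- def get_nrz_i(data):
--     # Run-length construction: find the positions of the '1' bits (where the
--     # level toggles), then emit each constant-level run in one block, with the
--     # level of run k given by (-1)**k.
--     n = len(data)
--     cuts = [i for i, b in enumerate(data) if b == '1'] + [n]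
--     x = [0] + [v for i in range(n) for v in (i, i + 1)]
--     y = [1]
--     prev = 0
--     for k, c in enumerate(cuts):
--         y += [(-1) ** k] * (2 * (c - prev))
--         prev = c
--     return x, y
-- ===== Notes on version B (the rewrite author's own statement) =====
-- stated objective: alternative
-- what changed: A walks the bits once, toggling a carried level on each '1' and appending two points per bit; B instead extracts the toggle positions (indices of '1' bits), and emits y as constant-level runs between consecutive toggle positions, the level of run k being (-1)**k.
import Mathlib
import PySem

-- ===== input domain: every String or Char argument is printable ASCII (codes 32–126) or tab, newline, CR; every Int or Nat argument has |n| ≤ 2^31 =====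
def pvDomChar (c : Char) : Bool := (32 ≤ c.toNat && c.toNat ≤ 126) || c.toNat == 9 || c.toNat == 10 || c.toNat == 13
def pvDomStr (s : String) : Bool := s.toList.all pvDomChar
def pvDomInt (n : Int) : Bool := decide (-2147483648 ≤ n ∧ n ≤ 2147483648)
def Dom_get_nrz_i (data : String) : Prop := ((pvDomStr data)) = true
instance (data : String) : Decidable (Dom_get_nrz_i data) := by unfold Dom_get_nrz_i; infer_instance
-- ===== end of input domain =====

-- B replaces A's per-bit level-toggling loop by a run-length construction: it collects the
-- toggle positions (indices of '1' bits) and emits y as constant runs of level (-1)^k between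
-- consecutive toggles; objective: alternative algorithm, same O(n) cost.


-- ===== PORT A =====
-- A's loop body: toggle current_level on '1', then extend x with [i, i+1] and y with [level, level]
def pvStepA (acc : List Int × List Int × Int) (p : Int × Char) : List Int × List Int × Int :=
  let lvl := if p.2 = '1' then acc.2.2 * (-1) else acc.2.2
  (acc.1 ++ [p.1, p.1 + 1], acc.2.1 ++ [lvl, lvl], lvl)

-- literal port of A: one fold over enumerate(data) carrying (x, y, current_level)
def get_nrz_i (data : String) : List Int × List Int :=
  let st := (PySem.List.enumerate data.toList).foldl pvStepA ([0], [1], 1)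
  (st.1, st.2.1)

-- ===== PORT B =====
-- Source B's run loop body: y += [(-1) ** k] * (2 * (c - prev)); prev = c
-- (.toNat on the repetition count is exact: Python's list * m is empty for m ≤ 0;
--  (-1) ** k with the nonnegative enumerate index k is (-1 : Int) ^ k.toNat)
def pvStepY (acc : List Int × Int) (p : Int × Int) : List Int × Int :=
  (acc.1 ++ List.replicate (2 * (p.2 - acc.2)).toNat ((-1 : Int) ^ p.1.toNat), p.2)

-- literal port of Source B: toggle positions + sentinel n, x comprehension, run-emission fold
def get_nrz_i_alt (data : String) : List Int × List Int :=
  let n := data.toList.length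
  let cuts := ((PySem.List.enumerate data.toList).filterMap
      (fun p => if p.2 = '1' then some p.1 else none)) ++ [(n : Int)]
  let x : List Int := 0 :: (List.range n).flatMap (fun (i : Nat) => [(i : Int), (i : Int) + 1])
  let y := ((PySem.List.enumerate cuts).foldl pvStepY ([1], 0)).1
  (x, y)

-- ===== PRECONDITION & SPEC =====
def Spec_get_nrz_i (data : String) (out : List Int × List Int) : Prop := out = get_nrz_i_alt data
instance (data : String) (out : List Int × List Int) : Decidable (Spec_get_nrz_i data out) := by unfold Spec_get_nrz_i; infer_instance

-- ===== CLAIM (what is proved, stated in full; the proofs are below) =====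
def Claim_equal_get_nrz_i : Prop := ∀ (data : String), Dom_get_nrz_i data → Spec_get_nrz_i data (get_nrz_i data)

-- ===== LEMMAS AND PROOFS =====

-- the level represented by a prefix parity bit
def pvLvl (p : Bool) : Int := if p then -1 else 1

-- the parity table of a suffix, starting from parity q (level of bit i of A's loop)
def pvPars (l : List Char) (q : Bool) : List Bool :=
  match l with
  | [] => []
  | c :: t => let q' := xor q (decide (c = '1')); q' :: pvPars t q'

-- the toggle positions of l, offset by s (what Source B's cuts comprehension collects)
def pvToggles (l : List Char) (s : Int) : List Int :=
  match l with
  | [] => []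
  | c :: t => if c = '1' then s :: pvToggles t (s + 1) else pvToggles t (s + 1)

-- the run blocks emitted by Source B's loop from cuts, previous boundary prev, run index k
def pvRuns (cuts : List Int) (prev : Int) (k : Nat) : List Int :=
  match cuts with
  | [] => []
  | c :: t => List.replicate (2 * (c - prev)).toNat ((-1 : Int) ^ k) ++ pvRuns t c (k + 1)

lemma pvLvl_toggle (q : Bool) (c : Char) :
    (if c = '1' then pvLvl q * (-1) else pvLvl q) = pvLvl (xor q (decide (c = '1'))) := by
  by_cases h : c = '1' <;> cases q <;> simp [h, pvLvl]

lemma pvRangeShift (n : Nat) (s : Int) :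
    (List.range (n + 1)).flatMap (fun (i : Nat) => [s + (i : Int), s + (i : Int) + 1]) =
      [s, s + 1] ++ (List.range n).flatMap (fun (i : Nat) => [(s + 1) + (i : Int), (s + 1) + (i : Int) + 1]) := by
  rw [List.range_succ_eq_map, List.flatMap_cons, List.flatMap_map]
  simp only [Nat.cast_zero, add_zero, List.cons_append, List.nil_append]
  congr 2
  congr 1
  funext i
  push_cast
  ring_nf

lemma pvFoldA (l : List Char) : ∀ (s : Int) (q : Bool) (x y : List Int),
    (PySem.List.enumerate l s).foldl pvStepA (x, y, pvLvl q) =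
      (x ++ (List.range l.length).flatMap (fun (i : Nat) => [s + (i : Int), s + (i : Int) + 1]),
       y ++ (pvPars l q).flatMap (fun p => [pvLvl p, pvLvl p]),
       pvLvl ((pvPars l q).getLastD q)) := by
  induction l with
  | nil => intro s q x y; simp [PySem.List.enumerate_nil, pvPars]
  | cons c t ih =>
    intro s q x y
    rw [PySem.List.enumerate_cons]
    simp only [List.foldl_cons, pvStepA, pvLvl_toggle]
    rw [ih (s + 1) (xor q (decide (c = '1')))]
    simp only [pvPars, Prod.mk.injEq]
    refine ⟨?_, ?_, ?_⟩
    · rw [List.length_cons, pvRangeShift, List.append_assoc]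
    · simp [List.append_assoc]
    · cases pvPars t (xor q (decide (c = '1'))) <;> simp [List.getLastD]

-- Source B's cuts comprehension computes pvToggles
lemma pvTogglesBridge (l : List Char) : ∀ (s : Int),
    (PySem.List.enumerate l s).filterMap (fun p => if p.2 = '1' then some p.1 else none) =
      pvToggles l s := by
  induction l with
  | nil => intro s; simp [PySem.List.enumerate_nil, pvToggles]
  | cons c t ih =>
    intro s
    rw [PySem.List.enumerate_cons]
    by_cases h : c = '1' <;> simp [pvToggles, h, ih]

-- Source B's run loop computes pvRuns
lemma pvFoldY (cuts : List Int) : ∀ (k0 : Nat) (ys : List Int) (prev : Int),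
    ((PySem.List.enumerate cuts (k0 : Int)).foldl pvStepY (ys, prev)).1 =
      ys ++ pvRuns cuts prev k0 := by
  induction cuts with
  | nil => intro k0 ys prev; simp [PySem.List.enumerate_nil, pvRuns]
  | cons c t ih =>
    intro k0 ys prev
    rw [PySem.List.enumerate_cons]
    simp only [List.foldl_cons, pvStepY]
    have hcast : ((k0 : Int) + 1) = ((k0 + 1 : Nat) : Int) := by push_cast; ring
    rw [hcast, ih (k0 + 1)]
    simp [pvRuns, Int.toNat_natCast, List.append_assoc]

lemma pvToggles_ge (l : List Char) : ∀ (s : Int), ∀ a ∈ pvToggles l s, s ≤ a := by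
  induction l with
  | nil => intro s a ha; simp [pvToggles] at ha
  | cons c t ih =>
    intro s a ha
    by_cases h : c = '1' <;> simp [pvToggles, h] at ha
    · rcases ha with rfl | ha
      · exact le_refl a
      · linarith [ih (s + 1) a ha]
    · linarith [ih (s + 1) a ha]

-- peel one bit's worth of output off the front of a run list whose cuts all lie past prev
lemma pvRuns_cons_shift (cuts : List Int) (prev : Int) (k : Nat)
    (h : ∀ a ∈ cuts, prev + 1 ≤ a) (hne : cuts ≠ []) :
    pvRuns cuts prev k = (-1 : Int) ^ k :: (-1 : Int) ^ k :: pvRuns cuts (prev + 1) k := by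
  cases cuts with
  | nil => exact absurd rfl hne
  | cons c t =>
    have hc := h c (List.mem_cons_self ..)
    simp only [pvRuns]
    have h2 : (2 * (c - prev)).toNat = (2 * (c - (prev + 1))).toNat + 1 + 1 := by omega
    rw [h2]
    simp [List.replicate_succ]

lemma pvRunsMain (l : List Char) : ∀ (s : Int) (k : Nat) (q : Bool),
    pvLvl q = (-1 : Int) ^ k →
    pvRuns (pvToggles l s ++ [s + l.length]) s k =
      (pvPars l q).flatMap (fun p => [pvLvl p, pvLvl p]) := by
  induction l with
  | nil => intro s k q hq; simp [pvToggles, pvPars, pvRuns]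
  | cons c t ih =>
    intro s k q hq
    have hall : ∀ a ∈ pvToggles t (s + 1) ++ [(s + 1) + (t.length : Int)], s + 1 ≤ a := by
      intro a ha
      rcases List.mem_append.mp ha with ha | ha
      · exact pvToggles_ge t (s + 1) a ha
      · simp at ha; omega
    have hne : pvToggles t (s + 1) ++ [(s + 1) + (t.length : Int)] ≠ [] := by simp
    have hlen : s + ((c :: t).length : Int) = (s + 1) + (t.length : Int) := by
      simp [List.length_cons]; ring
    by_cases h : c = '1'
    · -- toggle: run boundary at s, run index advances to k + 1
      have hq' : pvLvl (!q) = (-1 : Int) ^ (k + 1) := by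
        cases q <;> simp [pvLvl] at hq ⊢ <;> simp [pow_succ, ← hq]
      have hT : pvToggles (c :: t) s = s :: pvToggles t (s + 1) := by simp [pvToggles, h]
      have hP : pvPars (c :: t) q = (!q) :: pvPars t (!q) := by simp [pvPars, h]
      rw [hT, hlen, List.cons_append]
      simp only [pvRuns]
      rw [pvRuns_cons_shift _ s (k + 1) hall hne, ih (s + 1) (k + 1) (!q) hq', hP]
      simp [← hq']
    · -- no toggle: same run continues over this bit
      have hT : pvToggles (c :: t) s = pvToggles t (s + 1) := by simp [pvToggles, h]
      have hP : pvPars (c :: t) q = q :: pvPars t q := by simp [pvPars, h]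
      rw [hT, hlen, pvRuns_cons_shift _ s k hall hne, ih (s + 1) k q hq, hP]
      simp [← hq]

theorem pv_main (data : String) : get_nrz_i data = get_nrz_i_alt data := by
  have hA := pvFoldA data.toList 0 false [0] [1]
  simp only [pvLvl, if_false, Bool.false_eq_true] at hA
  have hT := pvTogglesBridge data.toList 0
  have hY := pvFoldY (pvToggles data.toList 0 ++ [(data.toList.length : Int)]) 0 [1] 0
  simp only [Nat.cast_zero] at hY
  have hR := pvRunsMain data.toList 0 0 false (by simp [pvLvl])
  simp only [zero_add, pvLvl] at hR
  simp only [get_nrz_i, get_nrz_i_alt, hA, hT, hY, hR, zero_add]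
  simp

-- ===== VERDICT (by name: the statement is the Claim_ definition above) =====
theorem get_nrz_i_spec : Claim_equal_get_nrz_i := by
  intro data _
  unfold Spec_get_nrz_i
  exact pv_main data
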